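-- pv_equiv track=rewrite | github.com/ekrxjwh2009/R2-KG | FactKG/dbpedia_sparql.py | addPrefix_withrel
-- ===== SOURCE A (Python) =====
-- import itertools
--
-- prefix_dict = {'http': 'http://www.w3.org/2011/http#/',
--             'dbp' : 'http://dbpedia.org/property/',
--             'rdf' : 'http://www.w3.org/1999/02/22-rdf-syntax-ns#/',
--             'rdfs' : 'http://www.w3.org/2000/01/rdf-schema#/',
--             'rdftype' : 'http://www.w3.org/1999/02/22-rdf-syntax-ns#type/',
--             'dbpr' : 'http://dbpedia.org/resource/',
--             'dbpo' : 'http://dbpedia.org/ontology/',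
--             'dct' : 'http://purl.org/dc/terms/',
--             'rdfslabel' : 'http://www.w3.org/2000/01/rdf-schema#label/',
--             'xmlns' : 'http://xmlns.com/foaf/0.1/',
--             'gold' : 'http://purl.org/linguistics/gold/',
--             'dc' : 'http://purl.org/dc/elements/1.1/'}
--
-- def addPrefix_withrel(entity_set):
--     result = []
--     prefix = ['dbpr']
--     head = entity_set[0]
--     head_pref = []
--     tail = entity_set[2]
--     tail_pref = []
--
--     if head[0] != '"':
--         for pref in prefix:
--             head_pref.append('<' + prefix_dict[pref] + head + '>')
--     else:
--         head_pref.append(head)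
--     if tail[0] != '"':
--         for pref in prefix:
--             tail_pref.append('<' + prefix_dict[pref] + tail + '>')
--     else:
--         tail_pref.append(tail)
--
--     head_tail = [head_pref, tail_pref]
--     tail_head = [tail_pref, head_pref]
--     for combination in itertools.product(*head_tail):
--         result.append(list(combination))
--     for combination in itertools.product(*tail_head):
--         result.append(list(combination))
--
--     for temp in result:
--         temp.insert(1, '<' + prefix_dict['dbp'] + entity_set[1] + '>')
--     return result
-- ===== SOURCE B (Python) =====
-- prefix_dict = {'http': 'http://www.w3.org/2011/http#/',
--             'dbp' : 'http://dbpedia.org/property/',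
--             'rdf' : 'http://www.w3.org/1999/02/22-rdf-syntax-ns#/',
--             'rdfs' : 'http://www.w3.org/2000/01/rdf-schema#/',
--             'rdftype' : 'http://www.w3.org/1999/02/22-rdf-syntax-ns#type/',
--             'dbpr' : 'http://dbpedia.org/resource/',
--             'dbpo' : 'http://dbpedia.org/ontology/',
--             'dct' : 'http://purl.org/dc/terms/',
--             'rdfslabel' : 'http://www.w3.org/2000/01/rdf-schema#label/',
--             'xmlns' : 'http://xmlns.com/foaf/0.1/',
--             'gold' : 'http://purl.org/linguistics/gold/',
--             'dc' : 'http://purl.org/dc/elements/1.1/'}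
--
-- def _node(x):
--     return x if x[0] == '"' else '<' + prefix_dict['dbpr'] + x + '>'
--
-- def addPrefix_withrel(entity_set):
--     head = entity_set[0]
--     tail = entity_set[2]
--     h = _node(head)
--     t = _node(tail)
--     rel = '<' + prefix_dict['dbp'] + entity_set[1] + '>'
--     return [[h, rel, t], [t, rel, h]]
-- ===== Notes on version B (the rewrite author's own statement) =====
-- stated objective: simpler
-- what changed: Replaces the per-node accumulator lists, the two itertools.product passes over [head_pref, tail_pref] and the mutating insert-at-1 loop by a single prefixing helper and a direct literal [[h, rel, t], [t, rel, h]].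
import Mathlib
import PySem

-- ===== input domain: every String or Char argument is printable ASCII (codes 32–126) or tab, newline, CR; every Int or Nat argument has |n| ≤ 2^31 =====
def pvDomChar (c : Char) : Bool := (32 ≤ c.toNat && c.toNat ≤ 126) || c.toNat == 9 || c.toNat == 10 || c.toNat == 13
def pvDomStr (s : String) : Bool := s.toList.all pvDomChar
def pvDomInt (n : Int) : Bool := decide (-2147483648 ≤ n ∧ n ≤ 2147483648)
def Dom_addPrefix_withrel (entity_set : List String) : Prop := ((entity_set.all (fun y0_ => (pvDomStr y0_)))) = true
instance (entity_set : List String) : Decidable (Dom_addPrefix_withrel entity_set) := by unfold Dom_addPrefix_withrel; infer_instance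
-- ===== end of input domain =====

-- B replaces the accumulator lists, the two itertools.product passes and the mutating
-- insert-at-1 loop by one prefixing helper and a direct [[h,rel,t],[t,rel,h]] literal (simpler).

-- ===== PORT A =====
-- the module-level prefix_dict constant
def pvPrefixDictA : PySem.Dict String String :=
  PySem.Dict.ofList [("http", "http://www.w3.org/2011/http#/"),
   ("dbp", "http://dbpedia.org/property/"),
   ("rdf", "http://www.w3.org/1999/02/22-rdf-syntax-ns#/"),
   ("rdfs", "http://www.w3.org/2000/01/rdf-schema#/"),
   ("rdftype", "http://www.w3.org/1999/02/22-rdf-syntax-ns#type/"),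
   ("dbpr", "http://dbpedia.org/resource/"),
   ("dbpo", "http://dbpedia.org/ontology/"),
   ("dct", "http://purl.org/dc/terms/"),
   ("rdfslabel", "http://www.w3.org/2000/01/rdf-schema#label/"),
   ("xmlns", "http://xmlns.com/foaf/0.1/"),
   ("gold", "http://purl.org/linguistics/gold/"),
   ("dc", "http://purl.org/dc/elements/1.1/")]

-- getD is exact here: the only keys looked up ('dbpr', 'dbp') are present, so no KeyError.
def addPrefix_withrel (entity_set : List String) : List (List String) :=
  let prefs : List String := ["dbpr"]
  match PySem.List.pyGet? entity_set 0 with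
  | none => []  -- IndexError, excluded by Pre_
  | some head =>
  match PySem.List.pyGet? entity_set 2 with
  | none => []  -- IndexError, excluded by Pre_
  | some tail =>
  match PySem.Str.pyGet? head 0, PySem.Str.pyGet? tail 0 with
  | some hc, some tc =>
    let head_pref : List String :=
      if hc ≠ '"' then
        prefs.foldl (fun acc pref => acc ++ ["<" ++ PySem.Dict.getD pvPrefixDictA pref "" ++ head ++ ">"]) []
      else [head]
    let tail_pref : List String :=
      if tc ≠ '"' then
        prefs.foldl (fun acc pref => acc ++ ["<" ++ PySem.Dict.getD pvPrefixDictA pref "" ++ tail ++ ">"]) []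
      else [tail]
    -- itertools.product over the two-element list of lists, twice, appended in order
    let result : List (List String) :=
      (head_pref.flatMap (fun h => tail_pref.map (fun t => [h, t]))) ++
      (tail_pref.flatMap (fun t => head_pref.map (fun h => [t, h])))
    result.map (fun temp =>
      PySem.List.insert temp 1
        ("<" ++ PySem.Dict.getD pvPrefixDictA "dbp" "" ++ PySem.List.pyGetD entity_set 1 "" ++ ">"))
  | _, _ => []  -- IndexError on empty head/tail, excluded by Pre_

-- ===== PORT B =====
-- the module-level prefix_dict constant (B's own copy)
def pvPrefixDictB : PySem.Dict String String :=
  PySem.Dict.ofList [("http", "http://www.w3.org/2011/http#/"),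
   ("dbp", "http://dbpedia.org/property/"),
   ("rdf", "http://www.w3.org/1999/02/22-rdf-syntax-ns#/"),
   ("rdfs", "http://www.w3.org/2000/01/rdf-schema#/"),
   ("rdftype", "http://www.w3.org/1999/02/22-rdf-syntax-ns#type/"),
   ("dbpr", "http://dbpedia.org/resource/"),
   ("dbpo", "http://dbpedia.org/ontology/"),
   ("dct", "http://purl.org/dc/terms/"),
   ("rdfslabel", "http://www.w3.org/2000/01/rdf-schema#label/"),
   ("xmlns", "http://xmlns.com/foaf/0.1/"),
   ("gold", "http://purl.org/linguistics/gold/"),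
   ("dc", "http://purl.org/dc/elements/1.1/")]

def pvNode (x : String) : String :=
  if PySem.Str.pyGet? x 0 = some '"' then x
  else "<" ++ PySem.Dict.getD pvPrefixDictB "dbpr" "" ++ x ++ ">"

def addPrefix_withrel_alt (entity_set : List String) : List (List String) :=
  -- on a missing index (IndexError, excluded by Pre_) the option chain yields []
  (((PySem.List.pyGet? entity_set 0).bind fun head =>
    (PySem.List.pyGet? entity_set 2).map fun tail =>
      let h := pvNode head
      let t := pvNode tail
      let rel := "<" ++ PySem.Dict.getD pvPrefixDictB "dbp" "" ++ PySem.List.pyGetD entity_set 1 "" ++ ">"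
      [[h, rel, t], [t, rel, h]])).getD []

-- ===== PRECONDITION & SPEC =====
-- Pre_ excludes exactly the inputs where A raises IndexError: fewer than three elements,
-- or an empty head/tail string (head[0] / tail[0]).
def Pre_addPrefix_withrel (entity_set : List String) : Prop :=
  3 ≤ entity_set.length ∧ entity_set.getD 0 "" ≠ "" ∧ entity_set.getD 2 "" ≠ ""
instance (entity_set : List String) : Decidable (Pre_addPrefix_withrel entity_set) := by
  unfold Pre_addPrefix_withrel; infer_instance
def pvWitness_addPrefix_withrel : List String := ["x", "rel", "y"]

def Spec_addPrefix_withrel (entity_set : List String) (out : List (List String)) : Prop := out = addPrefix_withrel_alt entity_set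
instance (entity_set : List String) (out : List (List String)) : Decidable (Spec_addPrefix_withrel entity_set out) := by unfold Spec_addPrefix_withrel; infer_instance

-- ===== CLAIM (what is proved, stated in full; the proofs are below) =====
def Claim_equal_addPrefix_withrel : Prop := ∀ (entity_set : List String), Dom_addPrefix_withrel entity_set → Pre_addPrefix_withrel entity_set → Spec_addPrefix_withrel entity_set (addPrefix_withrel entity_set)

-- ===== LEMMAS AND PROOFS =====
theorem addPrefix_withrel_eq (a b c : String) (rest : List String)
    (hc : Char) (htl : List Char) (tc : Char) (ttl : List Char)
    (ha : a.toList = hc :: htl) (hcc : c.toList = tc :: ttl) :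
    addPrefix_withrel (a :: b :: c :: rest) = addPrefix_withrel_alt (a :: b :: c :: rest) := by
  have h0 : PySem.List.pyGet? (a :: b :: c :: rest) 0 = some a :=
    PySem.List.pyGet?_zero_cons a _
  have h2 : PySem.List.pyGet? (a :: b :: c :: rest) 2 = some c := by
    rw [show (2:Int) = ((2:Nat):Int) from rfl, PySem.List.pyGet?_natCast]; rfl
  have hsa : PySem.List.pyGet? a.toList 0 = some hc := by
    rw [ha]; exact PySem.List.pyGet?_zero_cons hc htl
  have hsc : PySem.List.pyGet? c.toList 0 = some tc := by
    rw [hcc]; exact PySem.List.pyGet?_zero_cons tc ttl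
  unfold addPrefix_withrel addPrefix_withrel_alt pvNode
  rw [h0, h2]
  by_cases hch : hc = '"' <;> by_cases tch : tc = '"' <;>
    simp [hsa, hsc, hch, tch, PySem.List.insert, PySem.List.sliceIndices, pvPrefixDictA, pvPrefixDictB]

-- ===== VERDICT (by name: the statement is the Claim_ definition above) =====
theorem addPrefix_withrel_spec : Claim_equal_addPrefix_withrel := by
  intro es _hdom hpre
  obtain ⟨hlen, hh, ht⟩ := hpre
  match es, hlen with
  | a :: b :: c :: rest, _ =>
    simp only [List.getD] at hh ht
    have ha : a.toList ≠ [] := fun h => hh (by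
      have := congrArg String.ofList h
      simpa using this)
    have hc : c.toList ≠ [] := fun h => ht (by
      have := congrArg String.ofList h
      simpa using this)
    obtain ⟨x, xs, hx⟩ := List.exists_cons_of_ne_nil ha
    obtain ⟨y, ys, hy⟩ := List.exists_cons_of_ne_nil hc
    exact addPrefix_withrel_eq a b c rest x xs y ys hx hy
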